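-- pv_equiv track=rewrite | github.com/erijjj/base_de_donnee | TP2/TP2_Ex4_Erij.py | isCandidateKey
-- ===== SOURCE A (Python) =====
-- def closure(F: "list of dependencies", K: "set") -> set:
--     """
--     Retourne la fermeture de K sous F (K+).
--     On part de K et on applique les DF de F jusqu'à stabilité.
--     """
--     result = set(K)
--     changed = True
--     while changed:
--         changed = False
--         for alpha, beta in F:
--             if alpha.issubset(result):
--                 before = len(result)
--                 result = result.union(beta)
--                 if len(result) > before:
--                     changed = True
--     return result
--
-- def isSuperKey(F: "list of dependencies", R: set, K: set) -> bool:
--     """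
--     K est une super-cle si K+ = R.
--     """
--     return closure(F, K) == R
--
-- def isCandidateKey(F: "list of dependencies", R: set, K: set) -> bool:
--
--     if not isSuperKey(F, R, K):
--         return False
--     for attr in K:
--         subset = K - {attr}
--         if subset and isSuperKey(F, R, subset):
--             return False
--     return True
-- ===== SOURCE B (Python) =====
-- def isCandidateKey(F, R, K):
--     kset = set(K)
--     rset = set(R)
--
--     # index: attribute -> indices of the dependencies whose left side mentions it
--     occurs = {}
--     for i, (alpha, beta) in enumerate(F):
--         for x in alpha:
--             occurs.setdefault(x, []).append(i)
--
--     def clos(S):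
--         # unsatisfied-count worklist closure (Beeri-Bernstein style): count[i] is the
--         # number of left-side attributes of F[i] not yet absorbed; a dependency
--         # fires exactly once, when its count drops to zero
--         count = [len(alpha) for alpha, _ in F]
--         closure = set(S)
--         queue = list(S)
--         for i, (alpha, beta) in enumerate(F):
--             if count[i] == 0:
--                 for y in beta:
--                     if y not in closure:
--                         closure.add(y)
--                         queue.append(y)
--         while queue:
--             x = queue.pop()
--             for i in occurs.get(x, []):
--                 count[i] -= 1
--                 if count[i] == 0:
--                     for y in F[i][1]:
--                         if y not in closure:
--                             closure.add(y)
--                             queue.append(y)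
--         return closure
--
--     if clos(kset) != rset:
--         return False
--     if len(kset) <= 1:
--         return True
--     for a in kset:
--         if clos(kset - {a}) == rset:
--             return False
--     return True
-- ===== Notes on version B (the rewrite author's own statement) =====
-- stated objective: alternative
-- what changed: A computes each attribute closure by repeated full fixpoint passes over F (re-testing issubset and re-unioning every dependency each pass until nothing changes); B uses the unsatisfied-count worklist closure (Beeri-Bernstein LINCLOSURE): a prebuilt attribute-to-dependency index, one pending-left-side counter per dependency and a queue of newly absorbed attributes, so each dependency fires exactly once and each attribute is dequeued once per closure; the minimality loop is gated by a single size test instead of per-attribute emptiness checks.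
import Mathlib
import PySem

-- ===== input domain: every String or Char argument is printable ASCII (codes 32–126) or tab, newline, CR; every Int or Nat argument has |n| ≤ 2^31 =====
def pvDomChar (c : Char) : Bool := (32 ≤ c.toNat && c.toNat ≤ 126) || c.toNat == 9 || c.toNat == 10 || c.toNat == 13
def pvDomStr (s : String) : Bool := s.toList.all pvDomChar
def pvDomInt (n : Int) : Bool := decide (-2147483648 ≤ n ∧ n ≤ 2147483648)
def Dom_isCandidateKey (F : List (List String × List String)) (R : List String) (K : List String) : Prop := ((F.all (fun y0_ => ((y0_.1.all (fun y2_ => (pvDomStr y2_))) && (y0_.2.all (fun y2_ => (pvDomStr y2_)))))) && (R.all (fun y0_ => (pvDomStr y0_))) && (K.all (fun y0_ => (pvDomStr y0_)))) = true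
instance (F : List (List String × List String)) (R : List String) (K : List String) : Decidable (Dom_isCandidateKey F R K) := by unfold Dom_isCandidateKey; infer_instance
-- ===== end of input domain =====

-- B replaces A's repeated full fixpoint passes over F by an unsatisfied-count
-- worklist closure (one counter per dependency, an index from attribute to the
-- dependencies mentioning it, a queue of newly added attributes), so each
-- dependency fires at most once per closure computation.

-- ===== PORT A =====

-- one iteration of the inner 'for alpha, beta in F' body of A's closure
def pvPassStep (st : PySem.Set String × Bool) (ab : List String × List String) :
    PySem.Set String × Bool :=
  if PySem.Set.issubset ab.1 st.1 then
    let before := PySem.Set.len st.1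
    let result := PySem.Set.union st.1 ab.2
    if PySem.Set.len result > before then (result, true) else (result, st.2)
  else st

def pvBetas (F : List (List String × List String)) : List String := F.flatMap (fun ab => ab.2)

-- termination measure for A's 'while changed' loop: distinct right-hand-side
-- attributes not yet in the result
def pvMeasureA (F : List (List String × List String)) (res : PySem.Set String) : Nat :=
  (List.filter (fun y => !PySem.Set.contains res y) (PySem.Set.ofList (pvBetas F))).length

theorem pvUnion_append (s : PySem.Set String) (t : List String) :
    PySem.Set.union s t = s ++ (PySem.Set.ofList t).filter (fun y => !PySem.Set.contains s y) :=
  PySem.Set.update_eq_append_filter s t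

theorem pvUnion_exists_new (s : PySem.Set String) (t : List String)
    (h : PySem.Set.len s < PySem.Set.len (PySem.Set.union s t)) :
    ∃ x, x ∈ PySem.Set.union s t ∧ x ∉ s := by
  rcases hf : (PySem.Set.ofList t).filter (fun y => !PySem.Set.contains s y) with _ | ⟨a, l⟩
  · exfalso
    rw [pvUnion_append, hf, List.append_nil] at h
    exact lt_irrefl _ h
  · refine ⟨a, ?_, ?_⟩
    · rw [pvUnion_append, hf]
      simp
    · have ha : a ∈ (PySem.Set.ofList t).filter (fun y => !PySem.Set.contains s y) := by
        rw [hf]; simp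
      have h2 := List.of_mem_filter ha
      simp only [Bool.not_eq_true'] at h2
      intro hc
      rw [(PySem.Set.contains_iff s a).mpr hc] at h2
      cases h2

theorem pvStep_fst_subset (r : PySem.Set String) (c : Bool) (ab : List String × List String)
    (h : PySem.Set.issubset ab.1 r = true) :
    (pvPassStep (r, c) ab).1 = PySem.Set.union r ab.2 := by
  simp only [pvPassStep, h, if_true]
  split <;> rfl

theorem pvStep_not_subset (r : PySem.Set String) (c : Bool) (ab : List String × List String)
    (h : PySem.Set.issubset ab.1 r = false) : pvPassStep (r, c) ab = (r, c) := by
  simp [pvPassStep, h]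

theorem pvStep_mem_mono (r : PySem.Set String) (c : Bool) (ab : List String × List String)
    (x : String) (hx : x ∈ r) : x ∈ (pvPassStep (r, c) ab).1 := by
  cases h : PySem.Set.issubset ab.1 r with
  | false => rw [pvStep_not_subset r c ab h]; exact hx
  | true => rw [pvStep_fst_subset r c ab h, pvUnion_append]; exact List.mem_append_left _ hx

theorem pvStep_new (r : PySem.Set String) (c : Bool) (ab : List String × List String)
    (x : String) (hx : x ∈ (pvPassStep (r, c) ab).1) :
    x ∈ r ∨ (x ∉ r ∧ x ∈ ab.2) := by
  cases h : PySem.Set.issubset ab.1 r with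
  | false => rw [pvStep_not_subset r c ab h] at hx; exact Or.inl hx
  | true =>
    rw [pvStep_fst_subset r c ab h] at hx
    by_cases hs : x ∈ r
    · exact Or.inl hs
    · refine Or.inr ⟨hs, ?_⟩
      rcases (PySem.Set.mem_union r ab.2 x).mp hx with h' | h'
      · exact absurd h' hs
      · exact h'

theorem pvStep_changed (r : PySem.Set String) (c : Bool) (ab : List String × List String)
    (h : (pvPassStep (r, c) ab).2 = true) :
    c = true ∨ ∃ x, x ∈ (pvPassStep (r, c) ab).1 ∧ x ∉ r := by
  cases hsub : PySem.Set.issubset ab.1 r with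
  | false => rw [pvStep_not_subset r c ab hsub] at h; exact Or.inl h
  | true =>
    by_cases hlt : PySem.Set.len r < PySem.Set.len (PySem.Set.union r ab.2)
    · obtain ⟨x, hx1, hx2⟩ := pvUnion_exists_new r ab.2 hlt
      exact Or.inr ⟨x, by rw [pvStep_fst_subset r c ab hsub]; exact hx1, hx2⟩
    · left
      simp only [pvPassStep, hsub, if_true] at h
      rw [if_neg hlt] at h
      exact h

theorem pvFold_mem_mono (F : List (List String × List String))
    (st : PySem.Set String × Bool) (x : String) (hx : x ∈ st.1) :
    x ∈ (F.foldl pvPassStep st).1 := by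
  induction F generalizing st with
  | nil => exact hx
  | cons ab F ih =>
    obtain ⟨r, c⟩ := st
    exact ih _ (pvStep_mem_mono r c ab x hx)

theorem pvFold_new (F : List (List String × List String))
    (st : PySem.Set String × Bool) (x : String) (hx : x ∈ (F.foldl pvPassStep st).1) :
    x ∈ st.1 ∨ (x ∉ st.1 ∧ x ∈ pvBetas F) := by
  induction F generalizing st with
  | nil => exact Or.inl hx
  | cons ab F ih =>
    obtain ⟨r, c⟩ := st
    rcases ih _ hx with h | ⟨h1, h2⟩
    · rcases pvStep_new r c ab x h with h' | ⟨h1', h2'⟩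
      · exact Or.inl h'
      · exact Or.inr ⟨h1', by simp [pvBetas]; exact Or.inl h2'⟩
    · refine Or.inr ⟨fun hc => h1 (pvStep_mem_mono r c ab x hc), ?_⟩
      simp [pvBetas] at h2 ⊢
      tauto

theorem pvFold_changed (F : List (List String × List String))
    (st : PySem.Set String × Bool) (h : (F.foldl pvPassStep st).2 = true) :
    st.2 = true ∨ ∃ x, x ∈ (F.foldl pvPassStep st).1 ∧ x ∉ st.1 := by
  induction F generalizing st with
  | nil => exact Or.inl h
  | cons ab F ih =>
    obtain ⟨r, c⟩ := st
    rcases ih _ h with h' | ⟨x, hx1, hx2⟩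
    · rcases pvStep_changed r c ab h' with h'' | ⟨x, hx1, hx2⟩
      · exact Or.inl h''
      · exact Or.inr ⟨x, pvFold_mem_mono F _ x hx1, hx2⟩
    · exact Or.inr ⟨x, hx1, fun hc => hx2 (pvStep_mem_mono r c ab x hc)⟩

theorem pvMeasureA_dec (F : List (List String × List String)) (res : PySem.Set String)
    (h : (F.foldl pvPassStep (res, false)).2 = true) :
    pvMeasureA F (F.foldl pvPassStep (res, false)).1 < pvMeasureA F res := by
  rcases pvFold_changed F (res, false) h with hc | ⟨x, hx1, hx2⟩
  · cases hc
  · have hxb : x ∈ pvBetas F := by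
      rcases pvFold_new F (res, false) x hx1 with h' | ⟨_, h2⟩
      · exact absurd h' hx2
      · exact h2
    unfold pvMeasureA
    have hsub : List.Sublist
        (List.filter (fun y => !PySem.Set.contains (F.foldl pvPassStep (res, false)).1 y)
          (PySem.Set.ofList (pvBetas F)))
        (List.filter (fun y => !PySem.Set.contains res y) (PySem.Set.ofList (pvBetas F))) := by
      apply List.monotone_filter_right
      intro a ha
      simp only [Bool.not_eq_true'] at ha ⊢
      rcases hca : PySem.Set.contains res a with _ | _
      · rfl
      · exfalso
        have : a ∈ (F.foldl pvPassStep (res, false)).1 :=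
          pvFold_mem_mono F _ a ((PySem.Set.contains_iff res a).mp hca)
        rw [(PySem.Set.contains_iff _ a).mpr this] at ha
        cases ha
    refine Nat.lt_of_le_of_ne hsub.length_le (fun heq => ?_)
    have heq' := hsub.eq_of_length heq
    have hxq : x ∈ List.filter (fun y => !PySem.Set.contains res y)
        (PySem.Set.ofList (pvBetas F)) := by
      apply List.mem_filter.mpr
      refine ⟨(PySem.Set.mem_ofList _ x).mpr hxb, ?_⟩
      simp only [Bool.not_eq_true']
      rcases hcx : PySem.Set.contains res x with _ | _
      · rfl
      · exact absurd ((PySem.Set.contains_iff res x).mp hcx) hx2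
    rw [← heq'] at hxq
    have := List.of_mem_filter hxq
    rw [(PySem.Set.contains_iff _ x).mpr hx1] at this
    cases this

def pvClosureLoopA (F : List (List String × List String)) (res : PySem.Set String) :
    PySem.Set String :=
  match h : F.foldl pvPassStep (res, false) with
  | (r, true) => pvClosureLoopA F r
  | (r, false) => r
termination_by pvMeasureA F res
decreasing_by
  have h2 := pvMeasureA_dec F res (by rw [h])
  rw [h] at h2
  exact h2

-- closure(F, K)
def pvClosureA (F : List (List String × List String)) (K : List String) : PySem.Set String :=
  pvClosureLoopA F (PySem.Set.ofList K)

-- isSuperKey(F, R, K)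
def pvIsSuperKeyA (F : List (List String × List String)) (R : List String) (K : List String) : Bool :=
  PySem.Set.equal (pvClosureA F K) (PySem.Set.ofList R)

def isCandidateKey (F : List (List String × List String)) (R : List String) (K : List String) : Bool :=
  if !pvIsSuperKeyA F R K then false
  else
    -- 'for attr in K: … return False' over a set; the result is order-independent
    (PySem.Set.ofList K).all (fun attr =>
      let subset := PySem.Set.diff (PySem.Set.ofList K) (PySem.Set.ofList [attr])
      !(decide (subset ≠ []) && pvIsSuperKeyA F R subset))

-- ===== PORT B =====

-- 'occurs.setdefault(x, []).append(i)' over 'for i, (alpha, beta) in enumerate(F): for x in alpha'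
def pvOccurs (F : List (List String × List String)) : PySem.Dict String (List Int) :=
  (PySem.List.enumerate F).foldl
    (fun d p => p.2.1.foldl
      (fun d x => PySem.Dict.insert d x (PySem.Dict.getD d x [] ++ [p.1])) d)
    PySem.Dict.empty

-- 'for y in beta: if y not in closure: closure.add(y); queue.append(y)'
def pvAddBeta (st : PySem.Set String × List String) (beta : List String) :
    PySem.Set String × List String :=
  beta.foldl (fun st y =>
    if PySem.Set.contains st.1 y then st else (PySem.Set.add st.1 y, st.2 ++ [y])) st

-- 'count[i] -= 1; if count[i] == 0: <absorb F[i][1]>', the body for one index of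
-- occurs[x] (count[i] / F[i] are indexed with the total forms; every i stored in
-- occurs is a valid index into F and count, so they compute exactly Python's indexing)
def pvFireStep (F : List (List String × List String))
    (s : List Int × (PySem.Set String × List String)) (i : Int) :
    List Int × (PySem.Set String × List String) :=
  let c := PySem.List.pySetD s.1 i (PySem.List.pyGetD s.1 i 0 - 1)
  if PySem.List.pyGetD c i 0 == 0 then
    (c, pvAddBeta s.2 (PySem.List.pyGetD F i ([], [])).2)
  else (c, s.2)

-- 'for i in occurs.get(x, []): …'
def pvFire (F : List (List String × List String)) (idxs : List Int)
    (count : List Int) (st : PySem.Set String × List String) :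
    List Int × (PySem.Set String × List String) :=
  idxs.foldl (pvFireStep F) (count, st)

theorem pvFireStep_eq (F : List (List String × List String)) (count : List Int)
    (c : PySem.Set String) (q : List String) (i : Int) :
    pvFireStep F (count, (c, q)) i =
      (PySem.List.pySetD count i (PySem.List.pyGetD count i 0 - 1),
       if PySem.List.pyGetD (PySem.List.pySetD count i (PySem.List.pyGetD count i 0 - 1)) i 0 == 0
       then pvAddBeta (c, q) (PySem.List.pyGetD F i ([], [])).2 else (c, q)) := by
  simp only [pvFireStep]
  split
  · rfl
  · rfl

theorem pvFire_cons (F : List (List String × List String)) (i : Int) (is : List Int)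
    (count : List Int) (c : PySem.Set String) (q : List String) :
    pvFire F (i :: is) count (c, q) =
      pvFire F is (pvFireStep F (count, (c, q)) i).1 (pvFireStep F (count, (c, q)) i).2 :=
  rfl

theorem pvAddBeta_shape (c : PySem.Set String) (q : List String) (beta : List String) :
    ∃ d, pvAddBeta (c, q) beta = (c ++ d, q ++ d) ∧ d.Nodup ∧
      ∀ y ∈ d, y ∈ beta ∧ y ∉ c := by
  induction beta generalizing c q with
  | nil => exact ⟨[], by simp [pvAddBeta]⟩
  | cons b bs ih =>
    by_cases hb : PySem.Set.contains c b = true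
    · obtain ⟨d, hd1, hd2, hd3⟩ := ih c q
      have hb' : (b ∈ c) = True := by simp [(PySem.Set.contains_iff c b).mp hb]
      refine ⟨d, ?_, hd2, fun y hy => ⟨List.mem_cons_of_mem _ (hd3 y hy).1, (hd3 y hy).2⟩⟩
      simpa [pvAddBeta, List.foldl_cons, hb'] using hd1
    · obtain ⟨d, hd1, hd2, hd3⟩ := ih (c ++ [b]) (q ++ [b])
      have hbm : b ∉ c := fun hc => hb ((PySem.Set.contains_iff c b).mpr hc)
      have hbm' : (b ∈ c) = False := by simp [hbm]
      refine ⟨b :: d, ?_, ?_, ?_⟩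
      · have : pvAddBeta (c, q) (b :: bs) = pvAddBeta (c ++ [b], q ++ [b]) bs := by
          simp [pvAddBeta, PySem.Set.add, List.foldl_cons, hbm']
        rw [this, hd1]
        simp
      · refine List.nodup_cons.mpr ⟨fun hc => ?_, hd2⟩
        have := (hd3 b hc).2
        simp at this
      · intro y hy
        rcases List.mem_cons.mp hy with rfl | hy'
        · exact ⟨List.mem_cons_self, hbm⟩
        · have := hd3 y hy'
          exact ⟨List.mem_cons_of_mem _ this.1, fun hc => this.2 (List.mem_append_left _ hc)⟩

theorem pvGetD_beta_mem (F : List (List String × List String)) (i : Int)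
    (y : String) (hy : y ∈ (PySem.List.pyGetD F i ([], [])).2) : y ∈ pvBetas F := by
  by_cases h : PySem.Raise.InRange F.length i
  · have := PySem.List.pyGetD_mem F ([], []) h
    simp only [pvBetas, List.mem_flatMap]
    exact ⟨_, this, hy⟩
  · rw [PySem.List.pyGetD_of_none] at hy
    · cases hy
    · exact (PySem.List.pyGet?_eq_none_iff F i).mpr h

theorem pvFire_shape (F : List (List String × List String)) (idxs : List Int)
    (count : List Int) (c : PySem.Set String) (q : List String) :
    ∃ d, (pvFire F idxs count (c, q)).2 = (c ++ d, q ++ d) ∧ d.Nodup ∧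
      ∀ y ∈ d, y ∈ pvBetas F ∧ y ∉ c := by
  induction idxs generalizing count c q with
  | nil => exact ⟨[], by simp [pvFire]⟩
  | cons i is ih =>
    rw [pvFire_cons, pvFireStep_eq]
    by_cases hz : (PySem.List.pyGetD (PySem.List.pySetD count i (PySem.List.pyGetD count i 0 - 1)) i 0 == 0) = true
    · rw [if_pos hz]
      obtain ⟨d1, hd1, hnd1, hprop1⟩ := pvAddBeta_shape c q (PySem.List.pyGetD F i ([], [])).2
      rw [hd1]
      obtain ⟨d2, hd2, hnd2, hprop2⟩ :=
        ih (PySem.List.pySetD count i (PySem.List.pyGetD count i 0 - 1)) (c ++ d1) (q ++ d1)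
      refine ⟨d1 ++ d2, ?_, ?_, ?_⟩
      · rw [hd2]
        simp [List.append_assoc]
      · refine List.Nodup.append hnd1 hnd2 (fun y hy1 hy2 => ?_)
        exact (hprop2 y hy2).2 (List.mem_append_right _ hy1)
      · intro y hy
        rcases List.mem_append.mp hy with hy' | hy'
        · exact ⟨pvGetD_beta_mem F i y (hprop1 y hy').1, (hprop1 y hy').2⟩
        · exact ⟨(hprop2 y hy').1, fun hc => (hprop2 y hy').2 (List.mem_append_left _ hc)⟩
    · rw [if_neg hz]
      exact ih (PySem.List.pySetD count i (PySem.List.pyGetD count i 0 - 1)) c q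

-- B's loop measure reuses pvMeasureA: right-hand-side attributes not yet absorbed
theorem pvMeasBDec (F : List (List String × List String)) (closure : PySem.Set String)
    (d : List String) (y : String) (hy : y ∈ d) (hyb : y ∈ pvBetas F) (hyc : y ∉ closure) :
    pvMeasureA F (closure ++ d) < pvMeasureA F closure := by
  unfold pvMeasureA
  have hsub : List.Sublist
      (List.filter (fun z => !PySem.Set.contains (closure ++ d) z) (PySem.Set.ofList (pvBetas F)))
      (List.filter (fun z => !PySem.Set.contains closure z) (PySem.Set.ofList (pvBetas F))) := by
    apply List.monotone_filter_right
    intro a ha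
    simp only [Bool.not_eq_true'] at ha ⊢
    rcases hca : PySem.Set.contains closure a with _ | _
    · rfl
    · exfalso
      have : a ∈ closure ++ d := List.mem_append_left _ ((PySem.Set.contains_iff closure a).mp hca)
      rw [(PySem.Set.contains_iff _ a).mpr this] at ha
      cases ha
  refine Nat.lt_of_le_of_ne hsub.length_le (fun heq => ?_)
  have heq' := hsub.eq_of_length heq
  have hyq : y ∈ List.filter (fun z => !PySem.Set.contains closure z)
      (PySem.Set.ofList (pvBetas F)) := by
    apply List.mem_filter.mpr
    refine ⟨(PySem.Set.mem_ofList _ y).mpr hyb, ?_⟩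
    simp only [Bool.not_eq_true']
    rcases hcx : PySem.Set.contains closure y with _ | _
    · rfl
    · exact absurd ((PySem.Set.contains_iff closure y).mp hcx) hyc
  rw [← heq'] at hyq
  have := List.of_mem_filter hyq
  rw [(PySem.Set.contains_iff _ y).mpr (List.mem_append_right _ hy)] at this
  cases this

-- 'while queue: x = queue.pop(); …'
def pvLoopB (F : List (List String × List String)) (occ : PySem.Dict String (List Int))
    (count : List Int) (closure : PySem.Set String) (queue : List String) :
    PySem.Set String :=
  match hq : queue.getLast? with
  | none => closure
  | some x =>
    let r := pvFire F (PySem.Dict.getD occ x []) count (closure, queue.dropLast)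
    pvLoopB F occ r.1 r.2.1 r.2.2
termination_by (pvMeasureA F closure, queue.length)
decreasing_by
  obtain ⟨q0, hq0⟩ := List.getLast?_eq_some_iff.mp hq
  obtain ⟨d, hd, hnd, hprop⟩ := pvFire_shape F (PySem.Dict.getD occ x []) count closure queue.dropLast
  rcases d with _ | ⟨y, d'⟩
  · apply Prod.Lex.right'
    · rw [show r.2.1 = closure by rw [hd]; simp]
    · rw [show r.2.2 = queue.dropLast by rw [hd]; simp, hq0]
      simp
  · apply Prod.Lex.left
    rw [show r.2.1 = closure ++ (y :: d') by rw [hd]]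
    exact pvMeasBDec F closure (y :: d') y List.mem_cons_self
      (hprop y List.mem_cons_self).1 (hprop y List.mem_cons_self).2

-- the zero-count pre-pass 'for i, (alpha, beta) in enumerate(F): if count[i] == 0: …'
def pvPrePass (F : List (List String × List String)) (count : List Int)
    (st : PySem.Set String × List String) : PySem.Set String × List String :=
  (PySem.List.enumerate F).foldl (fun st p =>
    if PySem.List.pyGetD count p.1 0 == 0 then pvAddBeta st p.2.2 else st) st

-- clos(S) (S is already a set at both call sites, so set(S) = S and list(S) = S)
def pvClosureB (F : List (List String × List String)) (occ : PySem.Dict String (List Int))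
    (S : PySem.Set String) : PySem.Set String :=
  let count := F.map (fun ab => ((ab.1.length : Int)))
  let st := pvPrePass F count (PySem.Set.ofList S, S)
  pvLoopB F occ count st.1 st.2

def isCandidateKey_alt (F : List (List String × List String)) (R : List String) (K : List String) : Bool :=
  let kset := PySem.Set.ofList K
  let rset := PySem.Set.ofList R
  let occ := pvOccurs F
  if !(PySem.Set.equal (pvClosureB F occ kset) rset) then false
  else if PySem.Set.len kset ≤ 1 then true
  else
    -- 'for a in kset: … return False' over a set; the result is order-independent
    kset.all (fun a =>
      !PySem.Set.equal (pvClosureB F occ (PySem.Set.diff kset (PySem.Set.ofList [a]))) rset)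

-- ===== PRECONDITION & SPEC =====
def Spec_isCandidateKey (F : List (List String × List String)) (R : List String) (K : List String) (out : Bool) : Prop := out = isCandidateKey_alt F R K
instance (F : List (List String × List String)) (R : List String) (K : List String) (out : Bool) : Decidable (Spec_isCandidateKey F R K out) := by unfold Spec_isCandidateKey; infer_instance

-- ===== CLAIM (what is proved, stated in full; the proofs are below) =====
def Claim_equal_isCandidateKey : Prop := ∀ (F : List (List String × List String)) (R : List String) (K : List String), Dom_isCandidateKey F R K → Spec_isCandidateKey F R K (isCandidateKey F R K)

-- ===== LEMMAS AND PROOFS =====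

-- attributes derivable from S under the dependencies of F
inductive pvDeriv (F : List (List String × List String)) (S : List String) : String → Prop
  | base (x : String) (h : x ∈ S) : pvDeriv F S x
  | step (a b : List String) (hab : (a, b) ∈ F) (ha : ∀ x ∈ a, pvDeriv F S x)
      (y : String) (hy : y ∈ b) : pvDeriv F S y

theorem pvUnion_eq_of_not_lt (s : PySem.Set String) (t : List String)
    (h : ¬ PySem.Set.len s < PySem.Set.len (PySem.Set.union s t)) :
    PySem.Set.union s t = s := by
  have happ := pvUnion_append s t
  rcases hf : (PySem.Set.ofList t).filter (fun y => !PySem.Set.contains s y) with _ | ⟨a, l⟩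
  · rw [happ, hf, List.append_nil]
  · exfalso
    apply h
    rw [happ, hf]
    simp only [PySem.Set.len, List.length_append, List.length_cons]
    push_cast
    omega

theorem pvStep_false (r : PySem.Set String) (c : Bool) (ab : List String × List String)
    (h : (pvPassStep (r, c) ab).2 = false) : c = false ∧ pvPassStep (r, c) ab = (r, c) := by
  cases hsub : PySem.Set.issubset ab.1 r with
  | false => rw [pvStep_not_subset r c ab hsub] at *; exact ⟨h, rfl⟩
  | true =>
    simp only [pvPassStep, hsub, if_true] at h ⊢
    by_cases hlt : PySem.Set.len r < PySem.Set.len (PySem.Set.union r ab.2)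
    · rw [if_pos hlt] at h; cases h
    · rw [if_neg hlt] at h ⊢
      exact ⟨h, by rw [pvUnion_eq_of_not_lt r ab.2 hlt]⟩

theorem pvFold_false (F : List (List String × List String))
    (st : PySem.Set String × Bool) (h : (F.foldl pvPassStep st).2 = false) :
    st.2 = false ∧ (F.foldl pvPassStep st).1 = st.1 := by
  induction F generalizing st with
  | nil => exact ⟨h, rfl⟩
  | cons ab F ih =>
    obtain ⟨r, c⟩ := st
    have h' := ih _ h
    have h'' := pvStep_false r c ab h'.1
    refine ⟨h''.1, ?_⟩
    rw [List.foldl_cons, h''.2]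
    have h3 := h'.2
    rw [h''.2] at h3
    exact h3

theorem pvPassClosed (F : List (List String × List String)) (res : PySem.Set String)
    (h : (F.foldl pvPassStep (res, false)).2 = false) :
    ∀ ab ∈ F, PySem.Set.issubset ab.1 res = true → ∀ y ∈ ab.2, y ∈ res := by
  induction F with
  | nil => intro ab hab; cases hab
  | cons e es ih =>
    intro ab hab hsub y hy
    have h1 := pvFold_false es _ h
    have h2 := pvStep_false res false e h1.1
    rcases List.mem_cons.mp hab with hab' | hab'
    · subst hab'
      have hfst := pvStep_fst_subset res false ab hsub
      rw [h2.2] at hfst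
      have hyu : y ∈ PySem.Set.union res ab.2 :=
        (PySem.Set.mem_union res ab.2 y).mpr (Or.inr hy)
      rw [← hfst] at hyu
      exact hyu
    · have h3 : (es.foldl pvPassStep (res, false)).2 = false := by
        rw [← h2.2]
        exact h
      exact ih h3 ab hab' hsub y hy

theorem pvPass_deriv (Fall F : List (List String × List String)) (S : List String)
    (hsub : ∀ ab ∈ F, ab ∈ Fall) (st : PySem.Set String × Bool)
    (hst : ∀ x ∈ st.1, pvDeriv Fall S x) :
    ∀ x ∈ (F.foldl pvPassStep st).1, pvDeriv Fall S x := by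
  induction F generalizing st with
  | nil => exact hst
  | cons e es ih =>
    obtain ⟨r, c⟩ := st
    apply ih (fun ab hab => hsub ab (List.mem_cons_of_mem e hab))
    intro x hx
    cases hc : PySem.Set.issubset e.1 r with
    | false => rw [pvStep_not_subset r c e hc] at hx; exact hst x hx
    | true =>
      rw [pvStep_fst_subset r c e hc] at hx
      rcases (PySem.Set.mem_union r e.2 x).mp hx with h' | h'
      · exact hst x h'
      · exact pvDeriv.step e.1 e.2 (by simpa using hsub e List.mem_cons_self)
          (fun z hz => hst z ((PySem.Set.issubset_iff e.1 r).mp hc z hz)) x h'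

theorem pvClosA_sub (F : List (List String × List String)) (res : PySem.Set String) :
    ∀ x ∈ res, x ∈ pvClosureLoopA F res := by
  fun_induction pvClosureLoopA F res with
  | case1 res r h ih =>
    intro x hx
    apply ih
    have := pvFold_mem_mono F (res, false) x hx
    rw [h] at this
    exact this
  | case2 res r h =>
    intro x hx
    have := pvFold_mem_mono F (res, false) x hx
    rw [h] at this
    exact this

theorem pvClosA_closed (F : List (List String × List String)) (res : PySem.Set String) :
    ∀ ab ∈ F, (∀ x ∈ ab.1, x ∈ pvClosureLoopA F res) →
      ∀ y ∈ ab.2, y ∈ pvClosureLoopA F res := by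
  fun_induction pvClosureLoopA F res with
  | case1 res r h ih => exact ih
  | case2 res r h =>
    intro ab hab hx y hy
    have hne : (F.foldl pvPassStep (res, false)).2 = false := by rw [h]
    have heq := (pvFold_false F (res, false) hne).2
    rw [h] at heq
    simp only at heq
    rw [heq] at hx ⊢
    exact pvPassClosed F res hne ab hab
      ((PySem.Set.issubset_iff ab.1 res).mpr hx) y hy

theorem pvClosA_min (F : List (List String × List String)) (S : List String)
    (res : PySem.Set String) :
    (∀ x ∈ res, pvDeriv F S x) → ∀ x ∈ pvClosureLoopA F res, pvDeriv F S x := by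
  fun_induction pvClosureLoopA F res with
  | case1 res r h ih =>
    intro hres
    apply ih
    intro x hx
    apply pvPass_deriv F F S (fun _ h => h) (res, false) hres
    rw [h]
    exact hx
  | case2 res r h =>
    intro hres x hx
    apply pvPass_deriv F F S (fun _ h => h) (res, false) hres
    rw [h]
    exact hx

theorem pvMemClosA (F : List (List String × List String)) (res : PySem.Set String)
    (x : String) : x ∈ pvClosureLoopA F res ↔ pvDeriv F res x := by
  constructor
  · exact fun h => pvClosA_min F res res (fun y hy => pvDeriv.base y hy) x h
  · intro h
    induction h with
    | base y hy => exact pvClosA_sub F res y hy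
    | step a b hab ha y hy iha => exact pvClosA_closed F res (a, b) hab iha y hy

-- ===== B-side lemmas =====

theorem pvOccAux (alpha : List String) (j : Int) (d : PySem.Dict String (List Int)) (y : String) :
    (alpha.foldl (fun d x => PySem.Dict.insert d x (PySem.Dict.getD d x [] ++ [j])) d).getD y []
      = d.getD y [] ++ List.replicate (alpha.count y) j := by
  induction alpha generalizing d with
  | nil => simp
  | cons x as ih =>
    rw [List.foldl_cons, ih, PySem.Dict.getD_insert]
    by_cases hyx : y = x
    · subst hyx
      rw [if_pos rfl, List.count_cons, List.append_assoc]
      simp [List.replicate_succ]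
    · rw [if_neg hyx, List.count_cons]
      have : (x == y) = false := by simp [Ne.symm hyx]
      simp [this]

theorem pvOccMain (ps : List (Int × (List String × List String)))
    (d : PySem.Dict String (List Int)) (y : String) :
    (ps.foldl (fun d p => p.2.1.foldl
        (fun d x => PySem.Dict.insert d x (PySem.Dict.getD d x [] ++ [p.1])) d) d).getD y []
      = d.getD y [] ++ ps.flatMap (fun p => List.replicate (p.2.1.count y) p.1) := by
  induction ps generalizing d with
  | nil => simp
  | cons p ps ih =>
    rw [List.foldl_cons, ih, pvOccAux]
    simp [List.append_assoc]

theorem pvOccurs_getD (F : List (List String × List String)) (y : String) :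
    (pvOccurs F).getD y []
      = (PySem.List.enumerate F).flatMap (fun p => List.replicate (p.2.1.count y) p.1) := by
  unfold pvOccurs
  rw [pvOccMain]
  rfl

theorem pvOccurs_mem (F : List (List String × List String)) (y : String) (j : Int)
    (hj : j ∈ (pvOccurs F).getD y []) : ∃ k : Nat, j = (k : Int) ∧ k < F.length := by
  rw [pvOccurs_getD] at hj
  obtain ⟨p, hp, hd⟩ := List.mem_flatMap.mp hj
  obtain ⟨k, hk, rfl⟩ := (PySem.List.mem_enumerate_iff F 0 p).mp hp
  have := List.eq_of_mem_replicate hd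
  exact ⟨k, by simpa using this, hk⟩

-- count of j in the flatMap, shifted enumeration
theorem pvOccCountAux (F : List (List String × List String)) (y : String) :
    ∀ (s : Int) (i : Nat),
    ((PySem.List.enumerate F s).flatMap (fun p => List.replicate (p.2.1.count y) p.1)).count (s + (i : Int))
      = (F.getD i ([], [])).1.count y := by
  induction F with
  | nil => intro s i; simp [PySem.List.enumerate]
  | cons ab F ih =>
    intro s i
    rw [PySem.List.enumerate_cons, List.flatMap_cons, List.count_append]
    cases i with
    | zero =>
      have h1 : (List.replicate (ab.1.count y) s).count (s + ((0 : Nat) : Int))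
          = ab.1.count y := by
        simp
      have h2 : ((PySem.List.enumerate F (s + 1)).flatMap
          (fun p => List.replicate (p.2.1.count y) p.1)).count (s + ((0 : Nat) : Int)) = 0 := by
        apply List.count_eq_zero.mpr
        intro hc
        obtain ⟨p, hp, hd⟩ := List.mem_flatMap.mp hc
        obtain ⟨k, hk, rfl⟩ := (PySem.List.mem_enumerate_iff F (s + 1) p).mp hp
        have := List.eq_of_mem_replicate hd
        omega
      rw [h1, h2]
      simp
    | succ i' =>
      have h1 : (List.replicate (ab.1.count y) s).count (s + ((i' + 1 : Nat) : Int)) = 0 := by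
        simp [List.count_replicate]
        omega
      have h2 : s + ((i' + 1 : Nat) : Int) = (s + 1) + (i' : Int) := by push_cast; ring
      rw [h1, h2, ih (s + 1) i']
      simp

theorem pvOccurs_count (F : List (List String × List String)) (y : String) (i : Nat) :
    ((pvOccurs F).getD y []).count (i : Int) = (F.getD i ([], [])).1.count y := by
  rw [pvOccurs_getD]
  have := pvOccCountAux F y 0 i
  simpa using this

-- number of left-side occurrences of dependency alpha not yet processed
-- (processed = in the closure but no longer in the queue)
def pvUnproc (closure : PySem.Set String) (q : List String) (alpha : List String) : Nat :=
  (alpha.filter (fun a => !(PySem.Set.contains closure a && !decide (a ∈ q)))).length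

theorem pvFilterSplit (l : List String) (x : String) (p q : String → Bool)
    (hpq : ∀ a, p a = (q a || a == x)) (hqx : q x = false) :
    (l.filter p).length = (l.filter q).length + l.count x := by
  induction l with
  | nil => simp
  | cons a as ih =>
    by_cases hax : a = x
    · subst hax
      rw [List.count_cons]
      have hp : p a = true := by rw [hpq]; simp
      simp [hp, hqx, ih]
      omega
    · have hp : p a = q a := by rw [hpq]; simp [hax]
      rw [List.count_cons]
      cases hq : q a with
      | false => simp [hp, hq, ih, hax]
      | true => simp [hp, hq, ih, hax]; omega

-- invariant of the worklist loop
def pvInv (F : List (List String × List String)) (S : List String)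
    (count : List Int) (closure : PySem.Set String) (queue : List String) : Prop :=
  closure.Nodup ∧ queue.Nodup ∧ (∀ y ∈ queue, y ∈ closure) ∧ (∀ y ∈ S, y ∈ closure) ∧
  (∀ y ∈ closure, pvDeriv F S y) ∧
  (∀ i : Nat, count.getD i 0 = (pvUnproc closure queue (F.getD i ([], [])).1 : Int)) ∧
  (∀ i : Nat, i < F.length → count.getD i 0 = 0 → ∀ y ∈ (F.getD i ([], [])).2, y ∈ closure)

-- invariant of the inner fold over occurs[x] (cl0/q0: closure and popped queue)
def pvJ (F : List (List String × List String)) (S : List String)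
    (cl0 : PySem.Set String) (q0 : List String)
    (l : List Int) (count : List Int) (c : PySem.Set String) (qq : List String) : Prop :=
  c.Nodup ∧ qq.Nodup ∧ (∀ y ∈ qq, y ∈ c) ∧ (∀ y ∈ cl0, y ∈ c) ∧
  (∀ y, (y ∈ c ∧ y ∉ qq) ↔ (y ∈ cl0 ∧ y ∉ q0)) ∧
  (∀ y ∈ c, pvDeriv F S y) ∧
  (∀ i : Nat, count.getD i 0 =
      (pvUnproc cl0 q0 (F.getD i ([], [])).1 : Int) + (l.count (i : Int) : Int)) ∧
  (∀ j ∈ l, ∃ k : Nat, j = (k : Int) ∧ k < F.length) ∧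
  (∀ i : Nat, i < F.length → count.getD i 0 = 0 → ∀ y ∈ (F.getD i ([], [])).2, y ∈ c)

theorem pvAddBeta_mono (c : PySem.Set String) (q : List String) (beta : List String)
    (y : String) (hy : y ∈ c) : y ∈ (pvAddBeta (c, q) beta).1 := by
  obtain ⟨d, hd, -, -⟩ := pvAddBeta_shape c q beta
  rw [hd]
  exact List.mem_append_left _ hy

theorem pvAddBeta_mem (c : PySem.Set String) (q : List String) (beta : List String) :
    ∀ y ∈ beta, y ∈ (pvAddBeta (c, q) beta).1 := by
  induction beta generalizing c q with
  | nil => intro y hy; cases hy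
  | cons b bs ih =>
    intro y hy
    by_cases hb : PySem.Set.contains c b = true
    · have hstep : pvAddBeta (c, q) (b :: bs) = pvAddBeta (c, q) bs := by
        have hb' : (b ∈ c) = True := by simp [(PySem.Set.contains_iff c b).mp hb]
        simp [pvAddBeta, List.foldl_cons, hb']
      rw [hstep]
      rcases List.mem_cons.mp hy with rfl | hy'
      · exact pvAddBeta_mono c q bs y ((PySem.Set.contains_iff c y).mp hb)
      · exact ih c q y hy'
    · have hbm : b ∉ c := fun hc => hb ((PySem.Set.contains_iff c b).mpr hc)
      have hbm' : (b ∈ c) = False := by simp [hbm]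
      have hstep : pvAddBeta (c, q) (b :: bs) = pvAddBeta (c ++ [b], q ++ [b]) bs := by
        simp [pvAddBeta, PySem.Set.add, List.foldl_cons, hbm']
      rw [hstep]
      rcases List.mem_cons.mp hy with rfl | hy'
      · exact pvAddBeta_mono _ _ bs y (List.mem_append_right _ List.mem_cons_self)
      · exact ih _ _ y hy'

-- getD facts for List.set used by the decrement step
theorem pvGetDSet_self (l : List Int) (k : Nat) (v : Int) (h : k < l.length) :
    (l.set k v).getD k 0 = v := by
  simp [List.getD_eq_getElem?_getD, List.getElem?_set_self h]

theorem pvGetDSet_ne (l : List Int) (k j : Nat) (v : Int) (h : j ≠ k) :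
    (l.set k v).getD j 0 = l.getD j 0 := by
  simp [List.getD_eq_getElem?_getD, List.getElem?_set_ne (by omega : k ≠ j)]

theorem pvGetD_oob (l : List Int) (k : Nat) (h : ¬ k < l.length) : l.getD k 0 = 0 := by
  simp [List.getD_eq_getElem?_getD, List.getElem?_eq_none (by omega : l.length ≤ k)]

theorem pvFire_J (F : List (List String × List String)) (S : List String)
    (cl0 : PySem.Set String) (q0 : List String) :
    ∀ (l : List Int) (count : List Int) (c : PySem.Set String) (qq : List String),
      pvJ F S cl0 q0 l count c qq →
      pvJ F S cl0 q0 [] (pvFire F l count (c, qq)).1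
        (pvFire F l count (c, qq)).2.1 (pvFire F l count (c, qq)).2.2 := by
  intro l
  induction l with
  | nil => intro count c qq hJ; exact hJ
  | cons i is ih =>
    intro count c qq hJ
    obtain ⟨hc_nd, hqq_nd, hqq_c, hcl0_c, hP, hsound, hcount, hlmem, hfired⟩ := hJ
    obtain ⟨k, rfl, hkF⟩ := hlmem i List.mem_cons_self
    have hcountk := hcount k
    have hcc : (((k : Int)) :: is).count (k : Int) = is.count (k : Int) + 1 := by
      simp
    rw [hcc] at hcountk
    have hpos : 0 < count.getD k 0 := by
      rw [hcountk]
      push_cast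
      omega
    have hkrange : k < count.length := by
      by_contra hcon
      rw [pvGetD_oob count k hcon] at hpos
      exact lt_irrefl _ hpos
    have hc1 : PySem.List.pySetD count ((k : Int)) (PySem.List.pyGetD count ((k : Int)) 0 - 1)
        = count.set k (count.getD k 0 - 1) := by
      rw [PySem.List.pySetD_natCast, PySem.List.pyGetD_natCast]
    have hget1 : PySem.List.pyGetD (count.set k (count.getD k 0 - 1)) ((k : Int)) 0
        = count.getD k 0 - 1 := by
      rw [PySem.List.pyGetD_natCast, pvGetDSet_self _ _ _ hkrange]
    have hcount' : ∀ j : Nat, (count.set k (count.getD k 0 - 1)).getD j 0 =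
        (pvUnproc cl0 q0 (F.getD j ([], [])).1 : Int) + (is.count ((j : Int)) : Int) := by
      intro j
      by_cases hjk : j = k
      · subst hjk
        rw [pvGetDSet_self _ _ _ hkrange, hcountk]
        push_cast
        omega
      · rw [pvGetDSet_ne _ _ _ _ hjk, hcount j]
        have hne : ((((k : Int))) :: is).count ((j : Int)) = is.count ((j : Int)) := by
          have hkj : (((k : Int)) == ((j : Int))) = false := by
            simp
            omega
          simp [List.count_cons, hkj]
        rw [hne]
    rw [pvFire_cons, pvFireStep_eq, hc1, hget1]
    by_cases hz : count.getD k 0 - 1 = 0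
    · -- the dependency fires: absorb its right side
      rw [if_pos (by rw [hz]; rfl)]
      have hub := hcount' k
      rw [pvGetDSet_self _ _ _ hkrange, hz] at hub
      have hu0 : pvUnproc cl0 q0 (F.getD k ([], [])).1 = 0 := by omega
      have hbeta : PySem.List.pyGetD F ((k : Int)) ([], []) = F.getD k ([], []) := by
        rw [PySem.List.pyGetD_natCast]
      rw [hbeta]
      -- every left-side attribute is already processed, hence in cl0
      have halpha : ∀ a ∈ (F.getD k ([], [])).1, a ∈ cl0 := by
        intro a ha
        unfold pvUnproc at hu0
        rw [List.length_eq_zero_iff] at hu0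
        have hmem := List.filter_eq_nil_iff.mp hu0 a ha
        simp at hmem
        exact hmem.1
      obtain ⟨d, hd, hd_nd, hd_prop⟩ := pvAddBeta_shape c qq (F.getD k ([], [])).2
      rw [hd]
      apply ih
      refine ⟨?_, ?_, ?_, ?_, ?_, ?_, hcount', fun j hj => hlmem j (List.mem_cons_of_mem _ hj), ?_⟩
      · exact List.Nodup.append hc_nd hd_nd (fun y hy1 hy2 => (hd_prop y hy2).2 hy1)
      · exact List.Nodup.append hqq_nd hd_nd (fun y hy1 hy2 => (hd_prop y hy2).2 (hqq_c y hy1))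
      · intro y hy
        rcases List.mem_append.mp hy with hy' | hy'
        · exact List.mem_append_left _ (hqq_c y hy')
        · exact List.mem_append_right _ hy'
      · exact fun y hy => List.mem_append_left _ (hcl0_c y hy)
      · intro y
        constructor
        · rintro ⟨hy1, hy2⟩
          rcases List.mem_append.mp hy1 with hy' | hy'
          · exact (hP y).mp ⟨hy', fun hc => hy2 (List.mem_append_left _ hc)⟩
          · exact absurd (List.mem_append_right qq hy') hy2
        · rintro ⟨hy1, hy2⟩
          have hyP := (hP y).mpr ⟨hy1, hy2⟩
          refine ⟨List.mem_append_left _ hyP.1, fun hc => ?_⟩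
          rcases List.mem_append.mp hc with hy' | hy'
          · exact hyP.2 hy'
          · exact (hd_prop y hy').2 hyP.1
      · intro y hy
        rcases List.mem_append.mp hy with hy' | hy'
        · exact hsound y hy'
        · have hyk := (hd_prop y hy').1
          have hmemF : F.getD k ([], []) ∈ F := by
            rw [List.getD_eq_getElem?_getD, List.getElem?_eq_getElem hkF]
            exact List.getElem_mem hkF
          exact pvDeriv.step (F.getD k ([], [])).1 (F.getD k ([], [])).2
            (by simpa using hmemF)
            (fun a ha => hsound a (hcl0_c a (halpha a ha))) y hyk
      · intro j hjF hj0 y hy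
        by_cases hjk : j = k
        · subst hjk
          have := pvAddBeta_mem c qq (F.getD j ([], [])).2 y hy
          rw [hd] at this
          exact this
        · rw [pvGetDSet_ne _ _ _ _ hjk] at hj0
          exact List.mem_append_left _ (hfired j hjF hj0 y hy)
    · -- no dependency fires at this step
      rw [if_neg (by simp only [beq_iff_eq]; exact hz)]
      apply ih
      refine ⟨hc_nd, hqq_nd, hqq_c, hcl0_c, hP, hsound, hcount',
        fun j hj => hlmem j (List.mem_cons_of_mem _ hj), ?_⟩
      intro j hjF hj0 y hy
      by_cases hjk : j = k
      · subst hjk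
        rw [pvGetDSet_self _ _ _ hkrange] at hj0
        exact absurd hj0 hz
      · rw [pvGetDSet_ne _ _ _ _ hjk] at hj0
        exact hfired j hjF hj0 y hy
theorem pvContains_eq (c : PySem.Set String) (a : String) :
    PySem.Set.contains c a = decide (a ∈ c) := by
  by_cases h : a ∈ c
  · simp only [h, decide_true]
    exact (PySem.Set.contains_iff c a).mpr h
  · simp only [h, decide_false]
    cases hc : PySem.Set.contains c a
    · rfl
    · exact absurd ((PySem.Set.contains_iff c a).mp hc) h

theorem pvPredBool (c : PySem.Set String) (q : List String) (a : String) :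
    (!(PySem.Set.contains c a && !decide (a ∈ q))) = !decide (a ∈ c ∧ a ∉ q) := by
  rw [pvContains_eq]
  by_cases h1 : a ∈ c <;> by_cases h2 : a ∈ q <;> simp [h1, h2]

theorem pvUnproc_congr (c1 c2 : PySem.Set String) (q1 q2 : List String) (alpha : List String)
    (h : ∀ a, (a ∈ c1 ∧ a ∉ q1) ↔ (a ∈ c2 ∧ a ∉ q2)) :
    pvUnproc c1 q1 alpha = pvUnproc c2 q2 alpha := by
  unfold pvUnproc
  congr 1
  apply List.filter_congr
  intro a _
  rw [pvPredBool, pvPredBool, decide_eq_decide.mpr (h a)]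

theorem pvLoopB_inv (F : List (List String × List String)) (S : List String)
    (count : List Int) (closure : PySem.Set String) (queue : List String)
    (hinv : pvInv F S count closure queue) :
    (∀ y ∈ pvLoopB F (pvOccurs F) count closure queue, pvDeriv F S y) ∧
    (∀ y ∈ S, y ∈ pvLoopB F (pvOccurs F) count closure queue) ∧
    (∀ ab ∈ F, (∀ a ∈ ab.1, a ∈ pvLoopB F (pvOccurs F) count closure queue) →
      ∀ y ∈ ab.2, y ∈ pvLoopB F (pvOccurs F) count closure queue) := by
  fun_induction pvLoopB F (pvOccurs F) count closure queue with
  | case1 count closure queue hq =>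
    obtain ⟨hnd, hqnd, hqc, hSc, hsound, hcnt, hfired⟩ := hinv
    have hqe : queue = [] := List.getLast?_eq_none_iff.mp hq
    subst hqe
    refine ⟨hsound, hSc, ?_⟩
    intro ab hab hsub y hy
    obtain ⟨k, hk, hkab⟩ := List.getElem_of_mem hab
    have hgd : F.getD k ([], []) = ab := by
      rw [List.getD_eq_getElem?_getD, List.getElem?_eq_getElem hk, hkab]
      rfl
    have h0 : pvUnproc closure [] ab.1 = 0 := by
      unfold pvUnproc
      rw [List.length_eq_zero_iff]
      apply List.filter_eq_nil_iff.mpr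
      intro a ha
      rw [pvPredBool]
      simp [hsub a ha]
    have hc0 : count.getD k 0 = 0 := by
      rw [hcnt k, hgd, h0]
      rfl
    have := hfired k hk hc0
    rw [hgd] at this
    exact this y hy
  | case2 count closure queue x hq r ih =>
    obtain ⟨hnd, hqnd, hqc, hSc, hsound, hcnt, hfired⟩ := hinv
    obtain ⟨q0, hq0⟩ := List.getLast?_eq_some_iff.mp hq
    subst hq0
    have hdrop : (q0 ++ [x]).dropLast = q0 := by simp
    have hxq : x ∈ q0 ++ [x] := List.mem_append_right _ List.mem_cons_self
    have hxc : x ∈ closure := hqc x hxq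
    have hxnq0 : x ∉ q0 := by
      have := List.disjoint_of_nodup_append hqnd
      intro hc
      exact this hc List.mem_cons_self
    -- initial inner-fold invariant
    have hJ : pvJ F S closure q0 ((pvOccurs F).getD x []) count closure q0 := by
      refine ⟨hnd, hqnd.of_append_left, fun y hy => hqc y (List.mem_append_left _ hy),
        fun y hy => hy, fun y => Iff.rfl, hsound, ?_, fun j hj => pvOccurs_mem F x j hj, ?_⟩
      · intro i
        rw [hcnt i, pvOccurs_count F x i]
        have hsplit := pvFilterSplit (F.getD i ([], [])).1 x
          (fun a => !(PySem.Set.contains closure a && !decide (a ∈ q0 ++ [x])))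
          (fun a => !(PySem.Set.contains closure a && !decide (a ∈ q0)))
          (fun a => by
            show (!(PySem.Set.contains closure a && !decide (a ∈ q0 ++ [x])))
              = ((!(PySem.Set.contains closure a && !decide (a ∈ q0))) || a == x)
            rw [pvPredBool, pvPredBool]
            by_cases h1 : a ∈ closure <;> by_cases h2 : a ∈ q0 <;> by_cases h3 : a = x <;>
              simp [h1, h2, h3, hxc])
          (by
            show (!(PySem.Set.contains closure x && !decide (x ∈ q0))) = false
            rw [pvPredBool]
            simp [hxc, hxnq0])
        unfold pvUnproc
        rw [hsplit]
        push_cast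
        ring
      · intro i hiF hi0 y hy
        exact hfired i hiF hi0 y hy
    have hJ' := pvFire_J F S closure q0 ((pvOccurs F).getD x []) count closure q0 hJ
    have hr : r = pvFire F ((pvOccurs F).getD x []) count (closure, q0) := by
      have hrr : r = pvFire F ((pvOccurs F).getD x []) count (closure, (q0 ++ [x]).dropLast) := rfl
      rw [hrr, hdrop]
    rw [hr] at ih ⊢
    obtain ⟨hc_nd, hqq_nd, hqq_c, hcl0_c, hP, hsound', hcount', _, hfired'⟩ := hJ'
    apply ih
    refine ⟨hc_nd, hqq_nd, hqq_c, fun y hy => hcl0_c y (hSc y hy), hsound', ?_, hfired'⟩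
    intro i
    rw [hcount' i]
    rw [pvUnproc_congr (pvFire F ((pvOccurs F).getD x []) count (closure, q0)).2.1 closure
        (pvFire F ((pvOccurs F).getD x []) count (closure, q0)).2.2 q0
        (F.getD i ([], [])).1 hP]
    simp

-- the pre-pass, generalized over the enumerated pair list
theorem pvPrePass_shape (count : List Int) :
    ∀ (ps : List (Int × (List String × List String))) (c : PySem.Set String) (q : List String),
    ∃ d, ps.foldl (fun st p =>
        if PySem.List.pyGetD count p.1 0 == 0 then pvAddBeta st p.2.2 else st) (c, q)
        = (c ++ d, q ++ d) ∧ d.Nodup ∧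
      ∀ y ∈ d, y ∉ c ∧ ∃ p ∈ ps, y ∈ p.2.2 ∧ (PySem.List.pyGetD count p.1 0 == 0) = true := by
  intro ps
  induction ps with
  | nil => exact fun c q => ⟨[], by simp⟩
  | cons p ps ih =>
    intro c q
    rw [List.foldl_cons]
    by_cases hz : (PySem.List.pyGetD count p.1 0 == 0) = true
    · rw [if_pos hz]
      obtain ⟨d1, hd1, hnd1, hprop1⟩ := pvAddBeta_shape c q p.2.2
      rw [hd1]
      obtain ⟨d2, hd2, hnd2, hprop2⟩ := ih (c ++ d1) (q ++ d1)
      refine ⟨d1 ++ d2, ?_, ?_, ?_⟩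
      · rw [hd2]
        simp [List.append_assoc]
      · refine List.Nodup.append hnd1 hnd2 (fun y hy1 hy2 => ?_)
        exact (hprop2 y hy2).1 (List.mem_append_right _ hy1)
      · intro y hy
        rcases List.mem_append.mp hy with hy' | hy'
        · exact ⟨(hprop1 y hy').2, p, List.mem_cons_self, (hprop1 y hy').1, hz⟩
        · obtain ⟨p', hp', hyp', hz'⟩ := (hprop2 y hy').2
          exact ⟨fun hc => (hprop2 y hy').1 (List.mem_append_left _ hc),
            p', List.mem_cons_of_mem _ hp', hyp', hz'⟩
    · rw [if_neg hz]
      obtain ⟨d, hd, hnd, hprop⟩ := ih c q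
      refine ⟨d, hd, hnd, fun y hy => ⟨(hprop y hy).1, ?_⟩⟩
      obtain ⟨p', hp', hyp', hz'⟩ := (hprop y hy).2
      exact ⟨p', List.mem_cons_of_mem _ hp', hyp', hz'⟩

theorem pvPrePass_mem (count : List Int) :
    ∀ (ps : List (Int × (List String × List String))) (c : PySem.Set String) (q : List String),
    ∀ p ∈ ps, (PySem.List.pyGetD count p.1 0 == 0) = true →
    ∀ y ∈ p.2.2, y ∈ (ps.foldl (fun st p =>
        if PySem.List.pyGetD count p.1 0 == 0 then pvAddBeta st p.2.2 else st) (c, q)).1 := by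
  intro ps
  induction ps with
  | nil => intro c q p hp; cases hp
  | cons p' ps ih =>
    intro c q p hp hz y hy
    rw [List.foldl_cons]
    rcases List.mem_cons.mp hp with rfl | hp'
    · rw [if_pos hz]
      obtain ⟨d1, hd1, -, -⟩ := pvAddBeta_shape c q p.2.2
      rw [hd1]
      obtain ⟨d2, hd2, -, -⟩ := pvPrePass_shape count ps (c ++ d1) (q ++ d1)
      rw [hd2]
      have hyc : y ∈ c ++ d1 := by
        have := pvAddBeta_mem c q p.2.2 y hy
        rw [hd1] at this
        exact this
      exact List.mem_append_left _ hyc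
    · by_cases hz' : (PySem.List.pyGetD count p'.1 0 == 0) = true
      · rw [if_pos hz']
        obtain ⟨d1, hd1, -, -⟩ := pvAddBeta_shape c q p'.2.2
        rw [hd1]
        exact ih (c ++ d1) (q ++ d1) p hp' hz y hy
      · rw [if_neg hz']
        exact ih c q p hp' hz y hy

theorem pvCountInit (F : List (List String × List String)) (i : Nat) :
    (F.map (fun ab => ((ab.1.length : Int)))).getD i 0 = ((F.getD i ([], [])).1.length : Int) := by
  by_cases hi : i < F.length
  · rw [List.getD_eq_getElem?_getD, List.getD_eq_getElem?_getD, List.getElem?_map,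
      List.getElem?_eq_getElem hi]
    rfl
  · rw [List.getD_eq_getElem?_getD, List.getD_eq_getElem?_getD,
      List.getElem?_eq_none (by simpa using hi),
      List.getElem?_eq_none (by omega : F.length ≤ i)]
    rfl

theorem pvMemClosB (F : List (List String × List String)) (S : List String)
    (hS : S.Nodup) (x : String) :
    x ∈ pvClosureB F (pvOccurs F) S ↔ pvDeriv F S x := by
  have hcl : pvClosureB F (pvOccurs F) S =
      pvLoopB F (pvOccurs F) (F.map (fun ab => ((ab.1.length : Int))))
        (pvPrePass F (F.map (fun ab => ((ab.1.length : Int)))) (PySem.Set.ofList S, S)).1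
        (pvPrePass F (F.map (fun ab => ((ab.1.length : Int)))) (PySem.Set.ofList S, S)).2 := rfl
  set count := F.map (fun ab => ((ab.1.length : Int))) with hcountdef
  have hofS : PySem.Set.ofList S = S := PySem.Set.ofList_eq_self_of_nodup S hS
  obtain ⟨d, hd, hnd_d, hprop⟩ := pvPrePass_shape count (PySem.List.enumerate F) S S
  have hpre : pvPrePass F count (PySem.Set.ofList S, S) = (S ++ d, S ++ d) := by
    rw [pvPrePass, hofS]
    exact hd
  -- the loop invariant holds after the pre-pass
  have hinv : pvInv F S count (S ++ d) (S ++ d) := by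
    refine ⟨?_, ?_, fun y hy => hy, fun y hy => List.mem_append_left _ hy, ?_, ?_, ?_⟩
    · exact List.Nodup.append hS hnd_d (fun y hy1 hy2 => (hprop y hy2).1 hy1)
    · exact List.Nodup.append hS hnd_d (fun y hy1 hy2 => (hprop y hy2).1 hy1)
    · intro y hy
      rcases List.mem_append.mp hy with hy' | hy'
      · exact pvDeriv.base y hy'
      · obtain ⟨p, hp, hyp, hz⟩ := (hprop y hy').2
        obtain ⟨k, hk, rfl⟩ := (PySem.List.mem_enumerate_iff F 0 p).mp hp
        have hz' : count.getD k 0 = 0 := by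
          have : ((0 : Int) + (k : Int)) = ((k : Int)) := by ring
          rw [this] at hz
          rw [← PySem.List.pyGetD_natCast count k (0 : Int)]
          simpa using hz
        have halen : (F.getD k ([], [])).1.length = 0 := by
          have := pvCountInit F k
          rw [hz'] at this
          omega
        have hgd : F.getD k ([], []) = F[k] := by
          rw [List.getD_eq_getElem?_getD, List.getElem?_eq_getElem hk]
          rfl
        have halpha : (F[k]).1 = [] := by
          rw [hgd] at halen
          exact List.length_eq_zero_iff.mp halen
        refine pvDeriv.step (F[k]).1 (F[k]).2 (by simp) ?_ y (by simpa using hyp)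
        intro a ha
        rw [halpha] at ha
        cases ha
    · intro i
      rw [pvCountInit F i]
      have : pvUnproc (S ++ d) (S ++ d) (F.getD i ([], [])).1
          = (F.getD i ([], [])).1.length := by
        unfold pvUnproc
        rw [List.filter_eq_self.mpr (fun a _ => by rw [pvPredBool]; simp; tauto)]
      rw [this]
    · intro i hiF hi0 y hy
      have hz : (PySem.List.pyGetD count ((i : Int)) 0 == 0) = true := by
        rw [PySem.List.pyGetD_natCast, hi0]
        rfl
      have hp : ((0 : Int) + (i : Int), F[i]) ∈ PySem.List.enumerate F 0 :=
        (PySem.List.mem_enumerate_iff F 0 _).mpr ⟨i, hiF, rfl⟩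
      have hgd : F.getD i ([], []) = F[i] := by
        rw [List.getD_eq_getElem?_getD, List.getElem?_eq_getElem hiF]
        rfl
      have := pvPrePass_mem count (PySem.List.enumerate F) S S _ hp
        (by simpa using hz) y (by rw [← hgd]; exact hy)
      rw [hd] at this
      exact this
  rw [hcl, hpre]
  obtain ⟨hsound, hsub, hclosed⟩ := pvLoopB_inv F S count (S ++ d) (S ++ d) hinv
  constructor
  · exact fun h => hsound x h
  · intro h
    induction h with
    | base y hy => exact hsub y hy
    | step a b hab ha y hy iha => exact hclosed (a, b) hab iha y hy
theorem pvSuperEqSet (F : List (List String × List String)) (R : List String)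
    (S : PySem.Set String) (hS : S.Nodup) :
    pvIsSuperKeyA F R S = PySem.Set.equal (pvClosureB F (pvOccurs F) S) (PySem.Set.ofList R) := by
  unfold pvIsSuperKeyA pvClosureA
  rw [PySem.Set.ofList_eq_self_of_nodup S hS]
  rw [Bool.eq_iff_iff, PySem.Set.equal_iff, PySem.Set.equal_iff]
  have hm : ∀ x, x ∈ pvClosureLoopA F S ↔ x ∈ pvClosureB F (pvOccurs F) S := fun x =>
    (pvMemClosA F S x).trans (pvMemClosB F S hS x).symm
  constructor
  · exact fun hh x => ((hm x).symm.trans (hh x))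
  · exact fun hh x => ((hm x).trans (hh x))

theorem pvNodupSingleton (l : List String) (a : String) (hnd : l.Nodup)
    (hall : ∀ x ∈ l, x = a) : l.length ≤ 1 := by
  cases l with
  | nil => simp
  | cons x xs =>
    have hx : x = a := hall x List.mem_cons_self
    cases xs with
    | nil => simp
    | cons y ys =>
      exfalso
      have hy : y = a := hall y (List.mem_cons_of_mem x List.mem_cons_self)
      have : x ≠ y := by
        have := List.nodup_cons.mp hnd
        intro hc
        exact this.1 (hc ▸ List.mem_cons_self)
      exact this (hx.trans hy.symm)

theorem pvDiffSingleton (kl : List String) (a : String) :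
    PySem.Set.diff kl (PySem.Set.ofList [a]) = kl.filter (fun x => !(x == a)) := by
  unfold PySem.Set.diff
  congr 1
  funext x
  have : PySem.Set.ofList [a] = [a] := by
    apply PySem.Set.ofList_eq_self_of_nodup
    simp
  rw [this]
  simp only [PySem.Set.contains, List.contains_cons, List.contains_nil, Bool.or_false]

theorem pvMain (F : List (List String × List String)) (R : List String) (K : List String) :
    isCandidateKey F R K = isCandidateKey_alt F R K := by
  simp only [isCandidateKey, isCandidateKey_alt]
  set kl := PySem.Set.ofList K with hkl
  set rset := PySem.Set.ofList R with hrset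
  have hnd : kl.Nodup := PySem.Set.nodup_ofList K
  have hKkl : pvIsSuperKeyA F R K = pvIsSuperKeyA F R kl := by
    unfold pvIsSuperKeyA pvClosureA
    rw [hkl, PySem.Set.ofList_ofList]
  rw [hKkl, pvSuperEqSet F R kl hnd]
  by_cases hsk : PySem.Set.equal (pvClosureB F (pvOccurs F) kl) rset = true
  · rw [hsk]
    simp only [Bool.not_true, Bool.false_eq_true, if_false]
    by_cases hlen : PySem.Set.len kl ≤ 1
    · rw [if_pos hlen]
      apply List.all_eq_true.mpr
      intro a ha
      have hsub0 : PySem.Set.diff kl (PySem.Set.ofList [a]) = [] := by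
        rw [pvDiffSingleton]
        apply List.filter_eq_nil_iff.mpr
        intro x hx
        simp only [Bool.not_eq_true', Bool.not_eq_false, beq_iff_eq]
        have h1 : kl.length ≤ 1 := by
          simp only [PySem.Set.len] at hlen
          exact_mod_cast hlen
        cases hk : kl with
        | nil => rw [hk] at hx; cases hx
        | cons z zs =>
          rw [hk] at h1
          simp at h1
          rw [h1] at hk
          rw [hk] at hx ha
          simp at hx ha
          rw [hx, ha]
      simp [hsub0]
    · rw [if_neg hlen]
      have hbody : ∀ a ∈ kl,
          (!(decide (PySem.Set.diff kl (PySem.Set.ofList [a]) ≠ []) &&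
              pvIsSuperKeyA F R (PySem.Set.diff kl (PySem.Set.ofList [a])))) =
          (!PySem.Set.equal
              (pvClosureB F (pvOccurs F) (PySem.Set.diff kl (PySem.Set.ofList [a]))) rset) := by
        intro a ha
        have hne : PySem.Set.diff kl (PySem.Set.ofList [a]) ≠ [] := by
          rw [pvDiffSingleton]
          intro hc
          have hall : ∀ x ∈ kl, x = a := by
            intro x hx
            by_contra hxa
            have : x ∈ kl.filter (fun x => !(x == a)) := by
              apply List.mem_filter.mpr
              exact ⟨hx, by simp [hxa]⟩
            rw [hc] at this
            cases this
          have := pvNodupSingleton kl a hnd hall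
          apply hlen
          simp only [PySem.Set.len]
          exact_mod_cast this
        rw [pvSuperEqSet F R _ (PySem.Set.nodup_diff _ _ hnd), ← hrset]
        simp only [hne, ne_eq, not_false_eq_true, decide_true, Bool.true_and]
      rw [Bool.eq_iff_iff, List.all_eq_true, List.all_eq_true]
      constructor
      · intro h a ha
        rw [← hbody a ha]
        exact h a ha
      · intro h a ha
        rw [hbody a ha]
        exact h a ha
  · cases hb : PySem.Set.equal (pvClosureB F (pvOccurs F) kl) rset with
    | false => simp
    | true => exact absurd hb hsk

-- ===== VERDICT (by name: the statement is the Claim_ definition above) =====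
theorem isCandidateKey_spec : Claim_equal_isCandidateKey := by
  intro F R K _
  unfold Spec_isCandidateKey
  exact pvMain F R K
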